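-- pv_equiv track=rewrite | github.com/uh-joan/cortellis-cli | cli_anything/cortellis/skills/landscape/recipes/enrich_literature.py | generate_publications_markdown
-- ===== SOURCE A (Python) =====
-- def generate_publications_markdown(publications, indication_name, total_queried=None):
--     """Produce recent_publications.md with a summary table and stats section."""
--     lines = [f"## Recent Publications: {indication_name}", ""]
--
--     if not publications:
--         lines.append("_No publications found._")
--         lines.append("")
--         lines.append("### Summary")
--         denom = total_queried if total_queried is not None else 0
--         lines.append(f"- 0 publications found for 0/{denom} drugs searched")
--         lines.append("")
--         return "\n".join(lines)
--
--     # Table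
--     lines.append("| Drug | Title | Authors | Journal | Date |")
--     lines.append("|---|---|---|---|---|")
--     for pub in publications:
--         drug = pub.get("drug_name", "")
--         title = pub.get("title", "")
--         authors = pub.get("authors", "")
--         journal = pub.get("journal", "")
--         date = pub.get("date", "")
--         # Truncate long titles for readability
--         if len(title) > 80:
--             title = title[:77] + "..."
--         lines.append(f"| {drug} | {title} | {authors} | {journal} | {date} |")
--     lines.append("")
--
--     # Summary stats
--     drugs_with_pubs = len({p.get("drug_name", "") for p in publications if p.get("drug_name")})
--     total_drugs_searched = total_queried if total_queried is not None else drugs_with_pubs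
--
--     # Most published drug
--     drug_counts = {}
--     for pub in publications:
--         d = pub.get("drug_name", "")
--         if d:
--             drug_counts[d] = drug_counts.get(d, 0) + 1
--     most_published = max(drug_counts.items(), key=lambda x: x[1]) if drug_counts else None
--
--     # Most recent publication
--     dated = [(p.get("date", ""), p.get("title", "")) for p in publications if p.get("date")]
--     most_recent = max(dated, key=lambda x: x[0]) if dated else None
--
--     lines.append("### Summary")
--     lines.append(
--         f"- {len(publications)} publications found for {drugs_with_pubs}/{total_drugs_searched} drugs searched"
--     )
--     if most_published:
--         lines.append(f"- Most published: {most_published[0]} ({most_published[1]} publications)")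
--     if most_recent:
--         title_snippet = most_recent[1][:60] + ("..." if len(most_recent[1]) > 60 else "")
--         lines.append(f"- Most recent: \"{title_snippet}\" ({most_recent[0]})")
--     lines.append("")
--
--     return "\n".join(lines)
-- ===== SOURCE B (Python) =====
-- def _get(pub, key):
--     return pub.get(key, "")
--
--
-- def _row(pub):
--     title = _get(pub, "title")
--     if len(title) > 80:
--         title = title[:77] + "..."
--     return f"| {_get(pub, 'drug_name')} | {title} | {_get(pub, 'authors')} | {_get(pub, 'journal')} | {_get(pub, 'date')} |\n"
--
--
-- def _bump(counts, pub):
--     drug = _get(pub, "drug_name")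
--     if drug:
--         counts[drug] = counts.get(drug, 0) + 1
--     return counts
--
--
-- def _newer(best, pub):
--     date = _get(pub, "date")
--     if date:
--         if best is None or best[0] < date:
--             return (date, _get(pub, "title"))
--     return best
--
--
-- def _better(top, item):
--     return item if top is None or top[1] < item[1] else top
--
--
-- def generate_publications_markdown(publications, indication_name, total_queried=None):
--     out = f"## Recent Publications: {indication_name}\n\n"
--     if not publications:
--         denom = total_queried if total_queried is not None else 0
--         return out + f"_No publications found._\n\n### Summary\n- 0 publications found for 0/{denom} drugs searched\n"
--     table = "| Drug | Title | Authors | Journal | Date |\n|---|---|---|---|---|\n"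
--     counts = {}
--     newest = None
--     for pub in publications:
--         table += _row(pub)
--         counts = _bump(counts, pub)
--         newest = _newer(newest, pub)
--     top = None
--     for item in counts.items():
--         top = _better(top, item)
--     denom = total_queried if total_queried is not None else len(counts)
--     out += table + f"\n### Summary\n- {len(publications)} publications found for {len(counts)}/{denom} drugs searched\n"
--     if top is not None:
--         out += f"- Most published: {top[0]} ({top[1]} publications)\n"
--     if newest is not None:
--         snippet = newest[1][:60] + ("..." if len(newest[1]) > 60 else "")
--         out += f"- Most recent: \"{snippet}\" ({newest[0]})\n"
--     return out
-- ===== Notes on version B (the rewrite author's own statement) =====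
-- stated objective: alternative
-- what changed: B builds the report string directly in a single fold over the publications that simultaneously accumulates the table text, the drug-count dict and the running most-recent publication, then derives the summary from those accumulators (len(counts) instead of a separate set comprehension, a running strictly-greater scan over counts.items() instead of max), replacing A's list-of-lines plus four separate passes (row loop, set comprehension, count loop + max, dated list + max) and final join.
import Mathlib
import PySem

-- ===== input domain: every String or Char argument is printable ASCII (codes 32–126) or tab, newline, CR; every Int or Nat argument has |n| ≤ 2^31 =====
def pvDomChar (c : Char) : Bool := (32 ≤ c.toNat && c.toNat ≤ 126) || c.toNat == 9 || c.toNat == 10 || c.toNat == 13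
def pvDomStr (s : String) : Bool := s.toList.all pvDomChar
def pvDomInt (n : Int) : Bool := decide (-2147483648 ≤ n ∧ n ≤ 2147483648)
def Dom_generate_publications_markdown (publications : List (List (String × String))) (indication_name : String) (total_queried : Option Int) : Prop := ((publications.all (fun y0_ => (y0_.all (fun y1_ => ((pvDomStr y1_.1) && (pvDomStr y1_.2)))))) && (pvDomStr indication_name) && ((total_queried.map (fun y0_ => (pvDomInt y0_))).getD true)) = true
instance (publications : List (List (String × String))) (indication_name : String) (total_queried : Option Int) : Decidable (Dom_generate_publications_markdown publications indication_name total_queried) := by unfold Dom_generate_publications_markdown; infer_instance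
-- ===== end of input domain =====

-- B rebuilds the report in ONE pass over the publications (row string, drug counts, running newest), replacing A's
-- list-of-lines + four separate scans (set comprehension, counts loop, max over items, max over dated); same output.

-- pub.get(key, "") on the association-list dict (first match, default "")
def pvGet (pub : List (String × String)) (key : String) : String :=
  (PySem.Dict.mk pub).getD key ""

-- ===== PORT A =====
def generate_publications_markdown (publications : List (List (String × String))) (indication_name : String) (total_queried : Option Int) : String :=
  let lines : List String := ["## Recent Publications: " ++ indication_name, ""]
  if publications = [] then
    let lines := lines ++ ["_No publications found._", "", "### Summary"]
    let denom : Int := match total_queried with | some t => t | none => 0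
    let lines := lines ++ ["- 0 publications found for 0/" ++ PySem.Int.toStr denom ++ " drugs searched", ""]
    PySem.Str.join "\n" lines
  else
    let lines := lines ++ ["| Drug | Title | Authors | Journal | Date |", "|---|---|---|---|---|"]
    let lines := publications.foldl (fun acc pub =>
      let drug := pvGet pub "drug_name"
      let title := pvGet pub "title"
      let authors := pvGet pub "authors"
      let journal := pvGet pub "journal"
      let date := pvGet pub "date"
      let title := if 80 < PySem.Str.len title then PySem.Str.slice title none (some 77) ++ "..." else title
      acc ++ ["| " ++ drug ++ " | " ++ title ++ " | " ++ authors ++ " | " ++ journal ++ " | " ++ date ++ " |"]) lines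
    let lines := lines ++ [""]
    let drugs_with_pubs : Int :=
      ((PySem.Set.ofList ((publications.filter (fun p => pvGet p "drug_name" != "")).map (fun p => pvGet p "drug_name"))).length : Int)
    let total_drugs_searched : Int := match total_queried with | some t => t | none => drugs_with_pubs
    let drug_counts : PySem.Dict String Int := publications.foldl (fun d pub =>
      let dn := pvGet pub "drug_name"
      if dn != "" then d.insert dn (d.getD dn 0 + 1) else d) PySem.Dict.empty
    let most_published : Option (String × Int) :=
      if drug_counts.items ≠ [] then PySem.List.max? drug_counts.items (fun x => x.2) else none
    let dated : List (String × String) :=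
      (publications.filter (fun p => pvGet p "date" != "")).map (fun p => (pvGet p "date", pvGet p "title"))
    let most_recent : Option (String × String) := if dated ≠ [] then PySem.List.max? dated (fun x => x.1) else none
    let lines := lines ++ ["### Summary",
      "- " ++ PySem.Int.toStr (publications.length : Int) ++ " publications found for " ++
        PySem.Int.toStr drugs_with_pubs ++ "/" ++ PySem.Int.toStr total_drugs_searched ++ " drugs searched"]
    let lines := match most_published with
      | some mp => lines ++ ["- Most published: " ++ mp.1 ++ " (" ++ PySem.Int.toStr mp.2 ++ " publications)"]
      | none => lines
    let lines := match most_recent with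
      | some mr =>
        let snippet := PySem.Str.slice mr.2 none (some 60) ++ (if 60 < PySem.Str.len mr.2 then "..." else "")
        lines ++ ["- Most recent: \"" ++ snippet ++ "\" (" ++ mr.1 ++ ")"]
      | none => lines
    let lines := lines ++ [""]
    PySem.Str.join "\n" lines

-- ===== PORT B =====
def pvRowB (pub : List (String × String)) : String :=
  let title := pvGet pub "title"
  let title := if 80 < PySem.Str.len title then PySem.Str.slice title none (some 77) ++ "..." else title
  "| " ++ pvGet pub "drug_name" ++ " | " ++ title ++ " | " ++ pvGet pub "authors" ++ " | " ++
    pvGet pub "journal" ++ " | " ++ pvGet pub "date" ++ " |\n"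

def pvBumpB (counts : PySem.Dict String Int) (pub : List (String × String)) : PySem.Dict String Int :=
  let drug := pvGet pub "drug_name"
  if drug != "" then counts.insert drug (counts.getD drug 0 + 1) else counts

def pvNewerB (best : Option (String × String)) (pub : List (String × String)) : Option (String × String) :=
  let date := pvGet pub "date"
  if date != "" then
    match best with
    | none => some (date, pvGet pub "title")
    | some b => if b.1 < date then some (date, pvGet pub "title") else some b
  else best

def pvTopB (top : Option (String × Int)) (item : String × Int) : Option (String × Int) :=
  match top with
  | none => some item
  | some t => if t.2 < item.2 then some item else some t

def generate_publications_markdown_alt (publications : List (List (String × String))) (indication_name : String) (total_queried : Option Int) : String :=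
  let out := "## Recent Publications: " ++ indication_name ++ "\n\n"
  if publications = [] then
    let denom : Int := match total_queried with | some t => t | none => 0
    out ++ "_No publications found._\n\n### Summary\n- 0 publications found for 0/" ++
      PySem.Int.toStr denom ++ " drugs searched\n"
  else
    let st := publications.foldl
      (fun st pub => (st.1 ++ pvRowB pub, (pvBumpB st.2.1 pub, pvNewerB st.2.2 pub)))
      (("| Drug | Title | Authors | Journal | Date |\n|---|---|---|---|---|\n" : String),
        ((PySem.Dict.empty : PySem.Dict String Int), (none : Option (String × String))))
    let table := st.1
    let counts := st.2.1
    let newest := st.2.2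
    let top : Option (String × Int) := counts.items.foldl (fun top item => pvTopB top item) none
    let denom : Int := match total_queried with | some t => t | none => (counts.size : Int)
    let out := out ++ table ++ "\n### Summary\n- " ++ PySem.Int.toStr (publications.length : Int) ++
      " publications found for " ++ PySem.Int.toStr (counts.size : Int) ++ "/" ++ PySem.Int.toStr denom ++
      " drugs searched\n"
    let out := match top with
      | some t => out ++ "- Most published: " ++ t.1 ++ " (" ++ PySem.Int.toStr t.2 ++ " publications)\n"
      | none => out
    let out := match newest with
      | some nw => out ++ "- Most recent: \"" ++ PySem.Str.slice nw.2 none (some 60) ++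
          (if 60 < PySem.Str.len nw.2 then "..." else "") ++ "\" (" ++ nw.1 ++ ")\n"
      | none => out
    out

-- ===== PRECONDITION & SPEC =====
def Spec_generate_publications_markdown (publications : List (List (String × String))) (indication_name : String) (total_queried : Option Int) (out : String) : Prop := out = generate_publications_markdown_alt publications indication_name total_queried
instance (publications : List (List (String × String))) (indication_name : String) (total_queried : Option Int) (out : String) : Decidable (Spec_generate_publications_markdown publications indication_name total_queried out) := by unfold Spec_generate_publications_markdown; infer_instance

-- ===== CLAIM (what is proved, stated in full; the proofs are below) =====
def Claim_equal_generate_publications_markdown : Prop := ∀ (publications : List (List (String × String))) (indication_name : String) (total_queried : Option Int), Dom_generate_publications_markdown publications indication_name total_queried → Spec_generate_publications_markdown publications indication_name total_queried (generate_publications_markdown publications indication_name total_queried)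

-- ===== LEMMAS AND PROOFS =====

-- string-literal decompositions used to align B's merged literals with A's line pieces
theorem pv_s1 : ("\n\n" : String) = "\n" ++ "\n" := by decide
theorem pv_s2 : ("_No publications found._\n\n### Summary\n- 0 publications found for 0/" : String) =
    "_No publications found._" ++ "\n" ++ "" ++ "\n" ++ "### Summary" ++ "\n" ++ "- 0 publications found for 0/" := by decide
theorem pv_s3 : (" drugs searched\n" : String) = " drugs searched" ++ "\n" := by decide
theorem pv_s4 : ("| Drug | Title | Authors | Journal | Date |\n|---|---|---|---|---|\n" : String) =
    "| Drug | Title | Authors | Journal | Date |" ++ "\n" ++ "|---|---|---|---|---|" ++ "\n" := by decide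
theorem pv_s5 : (" |\n" : String) = " |" ++ "\n" := by decide
theorem pv_s6 : ("\n### Summary\n- " : String) = "\n" ++ "### Summary" ++ "\n" ++ "- " := by decide
theorem pv_s7 : (" publications)\n" : String) = " publications)" ++ "\n" := by decide
theorem pv_s8 : (")\n" : String) = ")" ++ "\n" := by decide

theorem pv_foldl_append_str (l : List String) (init : String) :
    l.foldl (· ++ ·) init = init ++ String.join l := by
  induction l generalizing init with
  | nil => simp [String.join, String.append_empty]
  | cons a l ih =>
    show l.foldl (· ++ ·) (init ++ a) = _
    rw [ih]
    show _ = init ++ l.foldl (· ++ ·) ("" ++ a)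
    rw [ih, String.empty_append, String.append_assoc]

theorem pv_join_cons (a : String) (l : List String) : String.join (a :: l) = a ++ String.join l := by
  show l.foldl (· ++ ·) ("" ++ a) = _
  rw [pv_foldl_append_str, String.empty_append]

theorem pv_strjoin_cons (x y : String) (ys : List String) :
    PySem.Str.join "\n" (x :: y :: ys) = x ++ "\n" ++ PySem.Str.join "\n" (y :: ys) := by
  apply String.toList_inj.mp
  simp [PySem.Str.join, PySem.Chars.join_cons_cons, String.toList_append]

theorem pv_strjoin_single (x : String) : PySem.Str.join "\n" [x] = x := by
  apply String.toList_inj.mp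
  simp [PySem.Str.join, PySem.Chars.join_singleton]

theorem pv_strjoin_append (L M : List String) (h : M ≠ []) :
    PySem.Str.join "\n" (L ++ M) =
      String.join (L.map (· ++ "\n")) ++ PySem.Str.join "\n" M := by
  induction L with
  | nil => simp [String.join, String.empty_append]
  | cons a L ih =>
    obtain ⟨y, ys, hy⟩ : ∃ y ys, L ++ M = y :: ys := by
      cases L with
      | nil =>
        cases M with
        | nil => exact absurd rfl h
        | cons m ms => exact ⟨m, ms, by simp⟩
      | cons b bs => exact ⟨b, bs ++ M, rfl⟩
    show PySem.Str.join "\n" (a :: (L ++ M)) = _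
    rw [hy, pv_strjoin_cons, ← hy, ih]
    simp [pv_join_cons, String.append_assoc]

-- a += g(x) loop over a list is the joined map
theorem pv_foldl_str_map {α : Type} (g : α → String) (l : List α) (init : String) :
    l.foldl (fun s x => s ++ g x) init = init ++ String.join (l.map g) := by
  induction l generalizing init with
  | nil => simp [String.join, String.append_empty]
  | cons a l ih => simp [ih, pv_join_cons, String.append_assoc]

theorem pv_guard_max {α κ : Type} [LT κ] [DecidableLT κ] (l : List α) (key : α → κ) :
    (if l ≠ [] then PySem.List.max? l key else none) = PySem.List.max? l key := by
  by_cases h : l = [] <;> simp [h, PySem.List.max?]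

-- B's running "top" scan over the items is Python's max(items, key=snd)
theorem pv_top_eq (l : List (String × Int)) :
    l.foldl (fun top item => pvTopB top item) none = PySem.List.max? l (fun x => x.2) := by
  unfold PySem.List.max?
  apply PySem.List.foldl_congr_mem
  intro acc x _
  cases acc <;> simp [pvTopB]

theorem pv_newerB_skip (acc : Option (String × String)) (p : List (String × String))
    (hd : (pvGet p "date" != "") = false) : pvNewerB acc p = acc := by
  simp [pvNewerB, hd]

theorem pv_newer_filter (pubs : List (List (String × String))) : ∀ acc,
    pubs.foldl pvNewerB acc = (pubs.filter (fun p => pvGet p "date" != "")).foldl pvNewerB acc := by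
  induction pubs with
  | nil => intro acc; rfl
  | cons p ps ih =>
    intro acc
    by_cases hd : (pvGet p "date" != "") = true
    · simp only [List.foldl_cons, List.filter_cons, hd, if_true]
      exact ih _
    · have hf : (pvGet p "date" != "") = false := by simpa using hd
      simp only [List.foldl_cons, List.filter_cons, hf, Bool.false_eq_true, if_false,
        pv_newerB_skip _ _ hf]
      exact ih _

-- B's running "newest" scan over the publications is Python's max(dated, key=fst)
theorem pv_newest_eq (pubs : List (List (String × String))) :
    pubs.foldl pvNewerB none =
      PySem.List.max?
        ((pubs.filter (fun p => pvGet p "date" != "")).map (fun p => (pvGet p "date", pvGet p "title")))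
        (fun x => x.1) := by
  rw [pv_newer_filter]
  unfold PySem.List.max?
  rw [List.foldl_map]
  apply PySem.List.foldl_congr_mem
  intro acc x hx
  have hd : (pvGet x "date" != "") = true := (List.mem_filter.mp hx).2
  cases acc <;> simp [pvNewerB, hd]

-- A's inline count loop is B's pvBumpB loop
theorem pv_bumpA (pubs : List (List (String × String))) :
    List.foldl (fun d pub =>
        if pvGet pub "drug_name" != "" then d.insert (pvGet pub "drug_name") (d.getD (pvGet pub "drug_name") 0 + 1) else d)
      (PySem.Dict.empty : PySem.Dict String Int) pubs = List.foldl pvBumpB PySem.Dict.empty pubs := rfl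

theorem pv_bump_skip (d : PySem.Dict String Int) (p : List (String × String))
    (hd : (pvGet p "drug_name" != "") = false) : pvBumpB d p = d := by
  simp [pvBumpB, hd]

theorem pv_bump_filter (pubs : List (List (String × String))) : ∀ d,
    pubs.foldl pvBumpB d =
      (pubs.filter (fun p => pvGet p "drug_name" != "")).foldl
        (fun d p => d.insert (pvGet p "drug_name") (d.getD (pvGet p "drug_name") 0 + 1)) d := by
  induction pubs with
  | nil => intro d; rfl
  | cons p ps ih =>
    intro d
    by_cases hd : (pvGet p "drug_name" != "") = true
    · have : pvBumpB d p = d.insert (pvGet p "drug_name") (d.getD (pvGet p "drug_name") 0 + 1) := by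
        simp [pvBumpB, hd]
      simp only [List.foldl_cons, List.filter_cons, hd, if_true, this]
      exact ih _
    · have hf : (pvGet p "drug_name" != "") = false := by simpa using hd
      simp only [List.foldl_cons, List.filter_cons, hf, Bool.false_eq_true, if_false,
        pv_bump_skip _ _ hf]
      exact ih _

-- the keys of the count dict are exactly A's set of non-empty drug names
theorem pv_counts_keys (pubs : List (List (String × String))) :
    (List.foldl pvBumpB (PySem.Dict.empty : PySem.Dict String Int) pubs).keys =
      PySem.Set.ofList ((pubs.filter (fun p => pvGet p "drug_name" != "")).map (fun p => pvGet p "drug_name")) := by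
  rw [pv_bump_filter]
  rw [PySem.Dict.keys_foldl_insert_key (key := fun p => pvGet p "drug_name")
    (f := fun d p => d.getD (pvGet p "drug_name") 0 + 1)]
  rw [PySem.Dict.keys_empty, PySem.Set.update_nil_left]

theorem pv_size_eq (pubs : List (List (String × String))) :
    ((List.foldl pvBumpB (PySem.Dict.empty : PySem.Dict String Int) pubs).size : Int) =
    ((PySem.Set.ofList ((pubs.filter (fun p => pvGet p "drug_name" != "")).map (fun p => pvGet p "drug_name"))).length : Int) := by
  rw [← pv_counts_keys]
  simp [PySem.Dict.size, PySem.Dict.keys]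

-- B's row string is A's table line plus the newline
theorem pv_rowB_eq (pub : List (String × String)) :
    pvRowB pub =
      ("| " ++ pvGet pub "drug_name" ++ " | " ++
        (if 80 < PySem.Str.len (pvGet pub "title") then PySem.Str.slice (pvGet pub "title") none (some 77) ++ "..." else pvGet pub "title") ++
        " | " ++ pvGet pub "authors" ++ " | " ++ pvGet pub "journal" ++ " | " ++ pvGet pub "date" ++ " |") ++ "\n" := by
  simp only [pvRowB]
  rw [pv_s5]
  simp [String.append_assoc]

theorem pv_mapRowB (pubs : List (List (String × String))) :
    pubs.map pvRowB =
      pubs.map (fun pub =>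
        ("| " ++ pvGet pub "drug_name" ++ " | " ++
          (if 80 < PySem.Str.len (pvGet pub "title") then PySem.Str.slice (pvGet pub "title") none (some 77) ++ "..." else pvGet pub "title") ++
          " | " ++ pvGet pub "authors" ++ " | " ++ pvGet pub "journal" ++ " | " ++ pvGet pub "date" ++ " |") ++ "\n") := by
  induction pubs with
  | nil => rfl
  | cons p ps ih => simp only [List.map_cons, ih, pv_rowB_eq]

theorem pv_strjoin_cons_append (x : String) (L : List String) (m : String) (M : List String) :
    PySem.Str.join "\n" (x :: (L ++ (m :: M))) =
      x ++ "\n" ++ String.join (L.map (· ++ "\n")) ++ PySem.Str.join "\n" (m :: M) := by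
  rw [show x :: (L ++ (m :: M)) = (x :: L) ++ (m :: M) from rfl,
    pv_strjoin_append _ _ (List.cons_ne_nil m M)]
  simp [pv_join_cons, String.append_assoc]

-- ===== VERDICT (by name: the statement is the Claim_ definition above) =====
set_option maxHeartbeats 2000000 in
theorem generate_publications_markdown_spec : Claim_equal_generate_publications_markdown := by
  intro pubs name tq _
  unfold Spec_generate_publications_markdown generate_publications_markdown generate_publications_markdown_alt
  by_cases h : pubs = []
  · subst h
    simp only [reduceIte]
    simp only [List.cons_append, List.nil_append]
    rw [pv_strjoin_cons, pv_strjoin_cons, pv_strjoin_cons, pv_strjoin_cons, pv_strjoin_cons,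
      pv_strjoin_cons, pv_strjoin_single]
    rw [pv_s1, pv_s2, pv_s3]
    simp [String.append_assoc, String.append_empty, String.empty_append, -String.reduceAppend]
  · simp only [if_neg h]
    rw [PySem.List.foldl_prod_mk (f := fun s pub => s ++ pvRowB pub)
      (g := fun s pub => (pvBumpB s.1 pub, pvNewerB s.2 pub))]
    rw [PySem.List.foldl_prod_mk (f := pvBumpB) (g := pvNewerB)]
    rw [pv_bumpA]
    rw [pv_top_eq, pv_guard_max, pv_guard_max, pv_newest_eq, pv_size_eq]
    rw [PySem.List.foldl_append_singleton_eq_map]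
    rw [pv_foldl_str_map]
    cases hmp : PySem.List.max?
        (List.foldl pvBumpB (PySem.Dict.empty : PySem.Dict String Int) pubs).items (fun x => x.2) with
    | none =>
      cases hmr : PySem.List.max?
          ((pubs.filter (fun p => pvGet p "date" != "")).map (fun p => (pvGet p "date", pvGet p "title")))
          (fun x => x.1) with
      | none =>
        simp only [List.append_assoc, List.cons_append, List.nil_append]
        rw [pv_strjoin_cons, pv_strjoin_cons, pv_strjoin_cons, pv_strjoin_cons_append]
        rw [pv_s1, pv_s4, pv_s6, pv_s3]
        simp [pv_strjoin_cons, pv_strjoin_single, pv_mapRowB,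
          List.map_map, Function.comp_def, String.append_assoc, String.append_empty,
          String.empty_append, -String.reduceAppend]
      | some mr =>
        simp only [List.append_assoc, List.cons_append, List.nil_append]
        rw [pv_strjoin_cons, pv_strjoin_cons, pv_strjoin_cons, pv_strjoin_cons_append]
        rw [pv_s1, pv_s4, pv_s6, pv_s3, pv_s8]
        simp [pv_strjoin_cons, pv_strjoin_single, pv_mapRowB,
          List.map_map, Function.comp_def, String.append_assoc, String.append_empty,
          String.empty_append, -String.reduceAppend]
    | some mp =>
      cases hmr : PySem.List.max?
          ((pubs.filter (fun p => pvGet p "date" != "")).map (fun p => (pvGet p "date", pvGet p "title")))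
          (fun x => x.1) with
      | none =>
        simp only [List.append_assoc, List.cons_append, List.nil_append]
        rw [pv_strjoin_cons, pv_strjoin_cons, pv_strjoin_cons, pv_strjoin_cons_append]
        rw [pv_s1, pv_s4, pv_s6, pv_s3, pv_s7]
        simp [pv_strjoin_cons, pv_strjoin_single, pv_mapRowB,
          List.map_map, Function.comp_def, String.append_assoc, String.append_empty,
          String.empty_append, -String.reduceAppend]
      | some mr =>
        simp only [List.append_assoc, List.cons_append, List.nil_append]
        rw [pv_strjoin_cons, pv_strjoin_cons, pv_strjoin_cons, pv_strjoin_cons_append]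
        rw [pv_s1, pv_s4, pv_s6, pv_s3, pv_s7, pv_s8]
        simp [pv_strjoin_cons, pv_strjoin_single, pv_mapRowB,
          List.map_map, Function.comp_def, String.append_assoc, String.append_empty,
          String.empty_append, -String.reduceAppend]
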